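-- pv_equiv track=rewrite | github.com/poedude5229/whiteboarding-DSA | Python/double-sequence.py | doublesequence
-- ===== SOURCE A (Python) =====
-- def doublesequence(base, length):
--     if length == 0:
--         return []
--
--     arr = [base]
--     while len(arr) < length:
--         last = arr[len(arr) - 1]
--         next = last * 2
--         arr.append(next)
--     return arr
-- ===== SOURCE B (Python) =====
-- def doublesequence(base, length):
--     if length == 0:
--         return []
--     return [base] + [base << i for i in range(1, length)]
-- ===== Notes on version B (the rewrite author's own statement) =====
-- stated objective: idiomatic
-- what changed: Replaces the incremental doubling loop over a growing accumulator with a closed-form comprehension computing each term independently as base << i.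
import Mathlib
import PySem

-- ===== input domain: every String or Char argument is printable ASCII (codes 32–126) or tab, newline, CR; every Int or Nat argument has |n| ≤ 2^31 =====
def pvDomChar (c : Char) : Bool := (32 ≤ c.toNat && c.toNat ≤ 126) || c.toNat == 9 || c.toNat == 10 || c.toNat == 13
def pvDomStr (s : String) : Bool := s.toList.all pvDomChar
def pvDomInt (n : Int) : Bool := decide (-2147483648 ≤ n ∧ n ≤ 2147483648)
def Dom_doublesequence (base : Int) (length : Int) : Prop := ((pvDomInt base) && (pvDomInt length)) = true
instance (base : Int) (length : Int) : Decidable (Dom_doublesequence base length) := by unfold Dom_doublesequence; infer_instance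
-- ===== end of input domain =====

-- B computes each term directly as base * 2^i instead of A's incremental doubling loop (idiomatic decomposition).
-- ===== PORT A =====
-- while len(arr) < length: last = arr[len(arr)-1]; arr.append(last*2)
-- (arr is nonempty throughout, so the pyGet? index is always valid; getD 0 is never the taken branch)
-- fuel = length.toNat bounds the iteration count (pure totality guard: the loop
-- adds one element per step and stops as soon as len(arr) >= length)
def dsLoop (fuel : Nat) (length : Int) (arr : List Int) : List Int :=
  match fuel with
  | 0 => arr
  | fuel + 1 =>
    if (arr.length : Int) < length then
      dsLoop fuel length (arr ++ [((PySem.List.pyGet? arr ((arr.length : Int) - 1)).getD 0) * 2])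
    else arr

def doublesequence (base : Int) (length : Int) : List Int :=
  if length = 0 then [] else dsLoop length.toNat length [base]

-- ===== PORT B =====
-- [base] + [base << i for i in range(1, length)]  (Python '<<' with i >= 0 is exact multiplication by 2^i)
def doublesequence_alt (base : Int) (length : Int) : List Int :=
  if length = 0 then []
  else base :: (PySem.List.pyRange 1 length 1).map (fun i => base * 2 ^ i.toNat)

-- ===== PRECONDITION & SPEC =====
def Spec_doublesequence (base : Int) (length : Int) (out : List Int) : Prop := out = doublesequence_alt base length
instance (base : Int) (length : Int) (out : List Int) : Decidable (Spec_doublesequence base length out) := by unfold Spec_doublesequence; infer_instance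

-- ===== CLAIM (what is proved, stated in full; the proofs are below) =====
def Claim_equal_doublesequence : Prop := ∀ (base : Int) (length : Int), Dom_doublesequence base length → Spec_doublesequence base length (doublesequence base length)

-- ===== LEMMAS AND PROOFS =====

-- ===== VERDICT (by name: the statement is the Claim_ definition above) =====
-- dsLoop starting from a list with last element x appends x*2, x*4, …
theorem dsLoop_spec (fuel : Nat) : ∀ (n : Nat) (length : Int) (l : List Int) (x : Int),
    (length - ((l.length : Int) + 1)).toNat = n → n ≤ fuel →
    dsLoop fuel length (l ++ [x]) = l ++ [x] ++ (List.range n).map (fun i => x * 2 ^ (i + 1)) := by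
  induction fuel with
  | zero =>
    intro n length l x h hn
    interval_cases n
    rw [dsLoop]
    simp
  | succ fuel ih =>
    intro n length l x h hn
    match n with
    | 0 =>
      rw [dsLoop]
      simp only [List.length_append, List.length_cons, List.length_nil]
      rw [if_neg (by push_cast; omega)]
      simp
    | n + 1 =>
    rw [dsLoop]
    simp only [List.length_append, List.length_cons, List.length_nil]
    rw [if_pos (by push_cast; omega)]
    have hget : PySem.List.pyGet? (l ++ [x]) (((l ++ [x]).length : Int) - 1) = some x := by
      have : (((l ++ [x]).length : Int) - 1) = (l.length : Int) := by simp
      rw [this]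
      simp [PySem.List.pyGet?, PySem.List.pyIdx?]
    simp only [List.length_append, List.length_cons, List.length_nil] at hget
    rw [hget]
    have hrec := ih n length (l ++ [x]) (x * 2) (by simp; omega) (by omega)
    simp only [Option.getD_some]
    rw [List.append_assoc] at hrec ⊢
    rw [hrec, List.range_succ_eq_map, List.map_cons, List.map_map]
    have hf : ((fun i => x * 2 ^ (i + 1)) ∘ (fun i => i + 1)) = (fun i => x * 2 * 2 ^ (i + 1)) := by
      funext i
      simp only [Function.comp, pow_succ]
      ring
    rw [hf]
    simp [List.append_assoc]

theorem doublesequence_spec : Claim_equal_doublesequence := by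
  intro base length _
  unfold Spec_doublesequence doublesequence doublesequence_alt
  by_cases h0 : length = 0
  · simp [h0]
  · rw [if_neg h0, if_neg h0]
    have hA := dsLoop_spec length.toNat (length - 1).toNat length [] base (by simp) (by omega)
    simp only [List.nil_append] at hA
    rw [hA, PySem.List.pyRange_one, List.map_map, List.singleton_append]
    refine congrArg (base :: ·) ?_
    apply List.map_congr_left
    intro i hi
    simp only [Function.comp]
    have : ((1 : Int) + i).toNat = i + 1 := by omega
    rw [this]
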